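-- pv_equiv track=rewrite | github.com/linhdvu14/cp-sols | sols/CodeForces/1807_d4/G1_Subsequence_Addition_Easy_Version_.py | solve
-- ===== SOURCE A (Python) =====
-- MAX = 5000
--
-- def solve(N, A):
--     A.sort()
--     if A[0] != 1: return 'NO'
--
--     dp = [0] * (MAX + 1)
--     dp[1] = 1
--     for i in range(1, N):
--         a = A[i]
--         if not dp[a]: return 'NO'
--         dp2 = dp[:]
--         for m in range(MAX + 1):
--             if dp[m] and m + a <= MAX:
--                 dp2[m + a] = 1
--         dp = dp2
--
--     return 'YES'
-- ===== SOURCE B (Python) =====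
-- def solve(N, A):
--     srt = sorted(A)
--     if srt[0] != 1:
--         return 'NO'
--     pre = []
--     s = 0
--     for a in srt:
--         s += a
--         pre.append(s)
--     if all(srt[i] <= pre[i - 1] for i in range(1, N)):
--         return 'YES'
--     return 'NO'
-- ===== Notes on version B (the rewrite author's own statement) =====
-- stated objective: alternative
-- what changed: Replaces the subset-sum bitmap DP (a 5001-entry table copied and extended per element) with two staged passes over the sorted list: build the prefix-sum array, then check every element against the previous prefix sum.
-- outside the precondition, e.g. on solve(5, [1, 5]): A returns 'NO', B returns 'NO'; on solve(3, [1, 3, 6000]): A returns 'NO', B returns 'NO'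
import Mathlib
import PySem

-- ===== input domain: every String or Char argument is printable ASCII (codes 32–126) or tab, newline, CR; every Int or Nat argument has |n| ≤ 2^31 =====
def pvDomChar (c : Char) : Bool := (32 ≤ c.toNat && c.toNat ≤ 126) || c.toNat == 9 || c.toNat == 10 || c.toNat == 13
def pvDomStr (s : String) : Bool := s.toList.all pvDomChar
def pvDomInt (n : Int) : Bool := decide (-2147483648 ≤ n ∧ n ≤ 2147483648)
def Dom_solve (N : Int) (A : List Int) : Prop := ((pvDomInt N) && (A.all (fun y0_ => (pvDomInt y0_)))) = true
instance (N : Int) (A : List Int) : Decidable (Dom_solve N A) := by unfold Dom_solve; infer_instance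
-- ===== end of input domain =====

-- B replaces A's subset-sum table DP with two staged passes over the sorted list: build the
-- prefix-sum array, then check every element against the previous prefix sum (alternative algorithm).
-- A sorts its argument list in place; the equivalence proved here is about the RETURN value only.

-- ===== PORT A =====
-- inner loop: dp2 = dp[:]; for m in range(MAX+1): if dp[m] and m+a <= MAX: dp2[m+a] = 1
def solveInner (dp : List Int) (a : Int) : List Int :=
  (PySem.List.pyRange 0 5001).foldl
    (fun dp2 m =>
      if PySem.List.pyGetD dp m 0 ≠ 0 ∧ m + a ≤ 5000 then PySem.List.pySetD dp2 (m + a) 1 else dp2)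
    dp

-- outer loop: for i in range(1, N) with the two early returns ("ERROR" marks where Python raises)
def solveLoop (As : List Int) (is_ : List Int) (dp : List Int) : String :=
  match is_ with
  | [] => "YES"
  | i :: rest =>
    match PySem.List.pyGet? As i with
    | none => "ERROR"   -- IndexError A[i]
    | some a =>
      match PySem.List.pyGet? dp a with
      | none => "ERROR" -- IndexError dp[a]
      | some v =>
        if v = 0 then "NO"
        else solveLoop As rest (solveInner dp a)

def solve (N : Int) (A : List Int) : String :=
  match PySem.List.pyGet? (PySem.List.sorted A (fun x => x)) 0 with
  | none => "ERROR"     -- IndexError A[0] (empty list)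
  | some a0 =>
    if a0 ≠ 1 then "NO"
    else solveLoop (PySem.List.sorted A (fun x => x)) (PySem.List.pyRange 1 N)
           (PySem.List.pySetD (List.replicate 5001 (0 : Int)) 1 1)

-- ===== PORT B =====
def solve_alt (N : Int) (A : List Int) : String :=
  match PySem.List.pyGet? (PySem.List.sorted A (fun x => x)) 0 with
  | none => "ERROR"     -- IndexError sorted(A)[0] (empty list)
  | some a0 =>
    if a0 ≠ 1 then "NO"
    else
      -- pre = []; s = 0; for a in srt: s += a; pre.append(s)
      let pre := ((PySem.List.sorted A (fun x => x)).foldl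
        (fun (st : List Int × Int) a => (st.1 ++ [st.2 + a], st.2 + a)) ([], 0)).1
      -- all(srt[i] <= pre[i-1] for i in range(1, N)); the 'none' arms are Python's IndexError,
      -- unreachable on inputs admitted by Pre_solve
      if (PySem.List.pyRange 1 N).all (fun i =>
          match PySem.List.pyGet? (PySem.List.sorted A (fun x => x)) i,
                PySem.List.pyGet? pre (i - 1) with
          | some x, some p => decide (x ≤ p)
          | _, _ => false)
      then "YES" else "NO"

-- ===== PRECONDITION & SPEC =====
-- Pre_ excludes inputs on which A raises (empty list; and, when the minimum is 1 so the dp loop runs,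
-- N exceeding len(A) (IndexError A[i]) or an element above MAX=5000 among the first N sorted values
-- (IndexError dp[a])); on a few such inputs A still returns 'NO' before reaching the bad access, and
-- there B returns 'NO' as well.
def Pre_solve (N : Int) (A : List Int) : Prop :=
  A ≠ [] ∧ ((PySem.List.sorted A (fun x => x)).head? = some 1 →
    N ≤ (A.length : Int) ∧ ∀ x ∈ (PySem.List.sorted A (fun x => x)).take N.toNat, x ≤ 5000)
instance (N : Int) (A : List Int) : Decidable (Pre_solve N A) := by unfold Pre_solve; infer_instance
def pvWitness_solve : Int × List Int := (3, [1, 1, 2])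

def Spec_solve (N : Int) (A : List Int) (out : String) : Prop := out = solve_alt N A
instance (N : Int) (A : List Int) (out : String) : Decidable (Spec_solve N A out) := by unfold Spec_solve; infer_instance

-- ===== CLAIM (what is proved, stated in full; the proofs are below) =====
def Claim_equal_solve : Prop := ∀ (N : Int) (A : List Int), Dom_solve N A → Pre_solve N A → Spec_solve N A (solve N A)

-- ===== LEMMAS AND PROOFS =====

-- proof-side abstraction of A's outer loop once the dp table is known to be an interval indicator:
-- running-reach greedy loop
def altLoop (srt : List Int) (is_ : List Int) (reach : Int) : String :=
  match is_ with
  | [] => "YES"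
  | i :: rest =>
    match PySem.List.pyGet? srt i with
    | none => "ERROR"
    | some a => if a > reach then "NO" else altLoop srt rest (reach + a)

-- the indicator list dp computed by A: dp[m] = 1 exactly for 1 ≤ m ≤ reach (length MAX+1)
def pvInd (r : Int) : List Int :=
  (List.range 5001).map (fun m : Nat => if 1 ≤ (m : Int) ∧ (m : Int) ≤ r then (1 : Int) else 0)

lemma pvInd_length (r : Int) : (pvInd r).length = 5001 := by
  unfold pvInd; rw [List.length_map, List.length_range]

lemma pvInd_getElem? (r : Int) (p : Nat) :
    (pvInd r)[p]? = if p < 5001 then some (if 1 ≤ (p : Int) ∧ (p : Int) ≤ r then 1 else 0) else none := by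
  by_cases hp : p < 5001
  · rw [if_pos hp]
    unfold pvInd
    rw [List.getElem?_map, List.getElem?_range hp]
    rfl
  · rw [if_neg hp]
    exact List.getElem?_eq_none (by rw [pvInd_length]; omega)

lemma pvInd_pyGetD (r m : Int) (h0 : 0 ≤ m) (h1 : m < 5001) :
    PySem.List.pyGetD (pvInd r) m 0 = if 1 ≤ m ∧ m ≤ r then 1 else 0 := by
  rw [PySem.List.pyGetD_eq_getElem _ _ h0 (by rw [pvInd_length]; exact_mod_cast h1)]
  unfold pvInd
  rw [List.getElem_map, List.getElem_range, Int.toNat_of_nonneg h0]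

lemma pvInd_pyGet? (r a : Int) (h1 : 1 ≤ a) (h5 : a ≤ 5000) :
    PySem.List.pyGet? (pvInd r) a = some (if a ≤ r then 1 else 0) := by
  rw [PySem.List.pyGet?_of_nonneg _ (by omega)]
  rw [List.getElem?_eq_getElem (by rw [pvInd_length]; omega)]
  unfold pvInd
  rw [List.getElem_map, List.getElem_range, Int.toNat_of_nonneg (by omega)]
  simp [h1]

lemma pv_fold_length (dp : List Int) (a : Int) (ms : List Int) (dp2 : List Int) :
    ((ms.foldl (fun dp2 m =>
      if PySem.List.pyGetD dp m 0 ≠ 0 ∧ m + a ≤ 5000 then PySem.List.pySetD dp2 (m + a) 1 else dp2)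
      dp2)).length = dp2.length := by
  induction ms generalizing dp2 with
  | nil => rfl
  | cons m rest ih =>
      simp only [List.foldl_cons]
      rw [ih]
      split_ifs <;> simp [PySem.List.length_pySetD]

lemma pv_fold_getElem? (dp : List Int) (a : Int) (ha : 0 ≤ a) (ms : List Int) (dp2 : List Int)
    (p : Nat) (h0 : ∀ m ∈ ms, 0 ≤ m) (hp : p < dp2.length) :
    ((ms.foldl (fun dp2 m =>
      if PySem.List.pyGetD dp m 0 ≠ 0 ∧ m + a ≤ 5000 then PySem.List.pySetD dp2 (m + a) 1 else dp2)
      dp2))[p]? =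
    if (∃ m ∈ ms, PySem.List.pyGetD dp m 0 ≠ 0 ∧ m + a ≤ 5000 ∧ m + a = (p : Int)) then some 1
    else dp2[p]? := by
  induction ms generalizing dp2 with
  | nil => simp
  | cons m rest ih =>
      have h0m : 0 ≤ m := h0 m (List.mem_cons_self ..)
      simp only [List.foldl_cons]
      rw [ih _ (fun x hx => h0 x (List.mem_cons_of_mem _ hx))
          (by split_ifs <;> simp [PySem.List.length_pySetD, hp])]
      by_cases hr : ∃ m' ∈ rest, PySem.List.pyGetD dp m' 0 ≠ 0 ∧ m' + a ≤ 5000 ∧ m' + a = (p : Int)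
      · obtain ⟨m', hm', hc⟩ := hr
        have e1 : ∃ m' ∈ rest, PySem.List.pyGetD dp m' 0 ≠ 0 ∧ m' + a ≤ 5000 ∧ m' + a = (p : Int) :=
          ⟨m', hm', hc⟩
        have e2 : ∃ m' ∈ m :: rest, PySem.List.pyGetD dp m' 0 ≠ 0 ∧ m' + a ≤ 5000 ∧ m' + a = (p : Int) :=
          ⟨m', List.mem_cons_of_mem _ hm', hc⟩
        rw [if_pos e1, if_pos e2]
      · rw [if_neg hr]
        by_cases hm : PySem.List.pyGetD dp m 0 ≠ 0 ∧ m + a ≤ 5000 ∧ m + a = (p : Int)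
        · have e2 : ∃ m' ∈ m :: rest, PySem.List.pyGetD dp m' 0 ≠ 0 ∧ m' + a ≤ 5000 ∧ m' + a = (p : Int) :=
            ⟨m, List.mem_cons_self .., hm⟩
          rw [if_pos e2]
          rw [if_pos (⟨hm.1, hm.2.1⟩ : PySem.List.pyGetD dp m 0 ≠ 0 ∧ m + a ≤ 5000)]
          rw [PySem.List.pySetD_of_nonneg _ _ (by omega)]
          rw [List.getElem?_set]
          have hmp : (m + a).toNat = p := by omega
          rw [if_pos hmp, if_pos (by omega)]
        · have hno : ¬ ∃ m' ∈ m :: rest,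
              PySem.List.pyGetD dp m' 0 ≠ 0 ∧ m' + a ≤ 5000 ∧ m' + a = (p : Int) := by
            rintro ⟨m', hm', hc⟩
            rcases List.mem_cons.mp hm' with rfl | hmem
            · exact hm hc
            · exact hr ⟨m', hmem, hc⟩
          rw [if_neg hno]
          by_cases hc : PySem.List.pyGetD dp m 0 ≠ 0 ∧ m + a ≤ 5000
          · rw [if_pos hc]
            rw [PySem.List.pySetD_of_nonneg _ _ (by omega)]
            rw [List.getElem?_set]
            rw [if_neg (by intro he; exact hm ⟨hc.1, hc.2, by omega⟩)]
          · rw [if_neg hc]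

lemma pv_step (r a : Int) (h1 : 1 ≤ a) (h2 : a ≤ r) (h5 : a ≤ 5000) :
    solveInner (pvInd r) a = pvInd (r + a) := by
  unfold solveInner
  apply List.ext_getElem?
  intro p
  by_cases hp : p < 5001
  · rw [pv_fold_getElem? (pvInd r) a (by omega) _ _ p
        (fun m hm => (PySem.List.mem_pyRange_one.mp hm).1) (by rw [pvInd_length]; exact hp)]
    rw [pvInd_getElem?, pvInd_getElem?, if_pos hp, if_pos hp]
    have hp5 : (p : Int) ≤ 5000 := by exact_mod_cast Nat.lt_succ_iff.mp hp
    by_cases hex : ∃ m ∈ PySem.List.pyRange 0 5001,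
        PySem.List.pyGetD (pvInd r) m 0 ≠ 0 ∧ m + a ≤ 5000 ∧ m + a = (p : Int)
    · rw [if_pos hex]
      obtain ⟨m, hm, hd, h50, hmp⟩ := hex
      rw [PySem.List.mem_pyRange_one] at hm
      rw [pvInd_pyGetD r m hm.1 hm.2] at hd
      have hmr : 1 ≤ m ∧ m ≤ r := by by_contra hc; rw [if_neg hc] at hd; exact hd rfl
      rw [if_pos (by omega : 1 ≤ (p : Int) ∧ (p : Int) ≤ r + a)]
    · rw [if_neg hex]
      by_cases hpr : 1 ≤ (p : Int) ∧ (p : Int) ≤ r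
      · rw [if_pos hpr, if_pos ⟨hpr.1, by omega⟩]
      · by_cases hpra : 1 ≤ (p : Int) ∧ (p : Int) ≤ r + a
        · exfalso
          apply hex
          refine ⟨(p : Int) - a, ?_, ?_, by omega, by omega⟩
          · rw [PySem.List.mem_pyRange_one]; omega
          · rw [pvInd_pyGetD r _ (by omega) (by omega), if_pos (by omega)]; norm_num
        · rw [if_neg hpr, if_neg hpra]
  · rw [List.getElem?_eq_none (by rw [pv_fold_length, pvInd_length]; omega),
        List.getElem?_eq_none (by rw [pvInd_length]; omega)]

lemma pv_init : PySem.List.pySetD (List.replicate 5001 (0 : Int)) 1 1 = pvInd 1 := by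
  rw [PySem.List.pySetD_of_nonneg _ _ (by norm_num)]
  apply List.ext_getElem?
  intro p
  rw [pvInd_getElem?, List.getElem?_set]
  by_cases hp : p < 5001
  · rw [if_pos hp]
    simp only [List.length_replicate, List.getElem?_replicate, Int.toNat_one]
    by_cases h1 : p = 1
    · subst h1; norm_num
    · rw [if_neg (by omega), if_pos hp, if_neg (by omega)]
  · rw [if_neg hp]
    simp only [List.length_replicate, List.getElem?_replicate, Int.toNat_one]
    rw [if_neg (by omega), if_neg (by omega)]

lemma pv_loop (srt : List Int) (is_ : List Int) (r : Int) (hr : 1 ≤ r)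
    (h : ∀ i ∈ is_, ∃ a, PySem.List.pyGet? srt i = some a ∧ 1 ≤ a ∧ a ≤ 5000) :
    solveLoop srt is_ (pvInd r) = altLoop srt is_ r := by
  induction is_ generalizing r with
  | nil => rfl
  | cons i rest ih =>
      obtain ⟨a, hga, ha1, ha5⟩ := h i (List.mem_cons_self ..)
      simp only [solveLoop, altLoop, hga]
      rw [pvInd_pyGet? r a ha1 ha5]
      by_cases hle : a ≤ r
      · have : ¬ a > r := by omega
        simp only [if_pos hle, this, if_false]
        rw [if_neg (by norm_num), pv_step r a ha1 hle ha5]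
        exact ih (r + a) (by omega) (fun j hj => h j (List.mem_cons_of_mem _ hj))
      · have hgt : r < a := by omega
        simp only [if_neg hle, gt_iff_lt, if_pos hgt]
        norm_num

-- the prefix-sum list built by B's first pass
def pvPfx (s : Int) : List Int → List Int
  | [] => []
  | a :: t => (s + a) :: pvPfx (s + a) t

lemma pv_foldl_pfx (xs : List Int) (acc : List Int) (s : Int) :
    xs.foldl (fun (st : List Int × Int) a => (st.1 ++ [st.2 + a], st.2 + a)) (acc, s)
      = (acc ++ pvPfx s xs, s + xs.sum) := by
  induction xs generalizing acc s with
  | nil => simp [pvPfx]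
  | cons a t ih =>
      simp only [List.foldl_cons, ih, pvPfx, List.sum_cons, Prod.mk.injEq]
      exact ⟨by simp, by ring⟩

lemma pvPfx_getElem? (s : Int) (xs : List Int) (j : Nat) (hj : j < xs.length) :
    (pvPfx s xs)[j]? = some (s + (xs.take (j + 1)).sum) := by
  induction xs generalizing s j with
  | nil => simp at hj
  | cons a t ih =>
      cases j with
      | zero => simp [pvPfx]
      | succ j' =>
          simp only [pvPfx, List.getElem?_cons_succ]
          rw [ih (s + a) j' (by simpa using hj)]
          simp only [List.take_succ_cons, List.sum_cons]
          congr 1; ring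

-- the check used in B's second pass
lemma pv_alt (srt pre : List Int)
    (hpre : ∀ j : Nat, j < srt.length → pre[j]? = some ((srt.take (j + 1)).sum))
    (N : Int) (hN : N ≤ (srt.length : Int)) :
    ∀ (n : Nat) (k : Int), 1 ≤ k → (N - k).toNat = n →
    altLoop srt (PySem.List.pyRange k N) ((srt.take k.toNat).sum) =
      (if (PySem.List.pyRange k N).all (fun i =>
          match PySem.List.pyGet? srt i, PySem.List.pyGet? pre (i - 1) with
          | some x, some p => decide (x ≤ p)
          | _, _ => false)
       then "YES" else "NO") := by
  intro n
  induction n with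
  | zero =>
      intro k hk hn
      rw [PySem.List.pyRange_one, hn]
      rfl
  | succ n ih =>
      intro k hk hn
      have hkN : k < N := by omega
      rw [PySem.List.pyRange_one_cons hkN]
      have hklen : k.toNat < srt.length := by omega
      have hga : PySem.List.pyGet? srt k = some srt[k.toNat] := by
        rw [PySem.List.pyGet?_of_nonneg _ (by omega)]
        exact List.getElem?_eq_getElem hklen
      have hgp : PySem.List.pyGet? pre (k - 1) = some ((srt.take k.toNat).sum) := by
        have hk1 : (k - 1).toNat + 1 = k.toNat := by omega
        rw [PySem.List.pyGet?_of_nonneg _ (by omega), hpre (k - 1).toNat (by omega), hk1]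
      simp only [altLoop, List.all_cons, hga, hgp]
      by_cases hle : srt[k.toNat] ≤ (srt.take k.toNat).sum
      · have hng : ¬ srt[k.toNat] > (srt.take k.toNat).sum := by omega
        rw [if_neg hng]
        have hsum : (srt.take k.toNat).sum + srt[k.toNat] = (srt.take (k + 1).toNat).sum := by
          have h1 : (k + 1).toNat = k.toNat + 1 := by omega
          rw [h1, List.take_add_one, List.sum_append,
              List.getElem?_eq_getElem hklen]
          simp
        rw [hsum]
        rw [ih (k + 1) (by omega) (by omega)]
        simp [hle]
      · have hg : srt[k.toNat] > (srt.take k.toNat).sum := by omega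
        rw [if_pos hg]
        simp [hle]

-- ===== VERDICT (by name: the statement is the Claim_ definition above) =====
theorem solve_spec : Claim_equal_solve := by
  unfold Claim_equal_solve
  intro N A _ hpre
  obtain ⟨hne, himp⟩ := hpre
  unfold Spec_solve solve solve_alt
  have hsne : PySem.List.sorted A (fun x => x) ≠ [] := by
    simpa [PySem.List.sorted_eq_nil_iff] using hne
  obtain ⟨s0, t, hS⟩ : ∃ s0 t, PySem.List.sorted A (fun x => x) = s0 :: t := by
    cases hS : PySem.List.sorted A (fun x => x) with
    | nil => exact absurd hS hsne
    | cons s0 t => exact ⟨s0, t, rfl⟩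
  have hget0 : PySem.List.pyGet? (PySem.List.sorted A (fun x => x)) 0 = some s0 := by
    rw [PySem.List.pyGet?_of_nonneg _ (by norm_num), hS]; rfl
  rw [hget0]
  by_cases h1 : s0 = 1
  · subst h1
    obtain ⟨hN, hbound⟩ := himp (by rw [hS]; rfl)
    simp only [ne_eq, not_true_eq_false, if_false]
    have hlenA : (PySem.List.sorted A (fun x => x)).length = A.length :=
      PySem.List.length_sorted ..
    have hNlen : N ≤ ((PySem.List.sorted A (fun x => x)).length : Int) := by
      rw [hlenA]; exact hN
    -- A's side reduces to the running-reach greedy loop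
    rw [pv_init]
    rw [pv_loop (PySem.List.sorted A (fun x => x)) (PySem.List.pyRange 1 N) 1 (by norm_num)
      (by
        intro i hi
        rw [PySem.List.mem_pyRange_one] at hi
        have hint : i.toNat < (PySem.List.sorted A (fun x => x)).length := by
          rw [hlenA]; omega
        refine ⟨(PySem.List.sorted A (fun x => x))[i.toNat], ?_, ?_, ?_⟩
        · rw [PySem.List.pyGet?_of_nonneg _ (by omega)]
          exact List.getElem?_eq_getElem hint
        · have h0 : (PySem.List.sorted A (fun x => x))[0] ≤
              (PySem.List.sorted A (fun x => x))[i.toNat] :=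
            PySem.List.sorted_id_getElem_mono A (Nat.zero_le _) hint
          have : (PySem.List.sorted A (fun x => x))[0]'(by omega) = 1 := by
            simp [hS]
          omega
        · apply hbound
          have hti : i.toNat < ((PySem.List.sorted A (fun x => x)).take N.toNat).length := by
            simp [hlenA]; omega
          have := List.getElem_take (xs := PySem.List.sorted A (fun x => x))
            (j := N.toNat) (i := i.toNat) (h := hti)
          rw [← this]
          exact List.getElem_mem hti)]
    -- B's side: the first pass builds pvPfx 0 srt; then the all-check lemma
    simp only [pv_foldl_pfx, List.nil_append]
    have hmain := pv_alt (PySem.List.sorted A (fun x => x))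
      (pvPfx 0 (PySem.List.sorted A (fun x => x)))
      (fun j hj => by rw [pvPfx_getElem? 0 _ j hj, zero_add])
      N hNlen (N - 1).toNat 1 (by norm_num) rfl
    have h1sum : ((PySem.List.sorted A (fun x => x)).take (1 : Int).toNat).sum = 1 := by
      rw [hS]; simp
    rw [h1sum] at hmain
    exact hmain
  · simp only [ne_eq, h1, not_false_eq_true, if_true]
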